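-- pv_equiv track=rewrite | github.com/thiernothierno/Technical-Interview-Prep-Summer-2025- | Unit_4/unit_4_session_2.py | find_most_frequent_keywords
-- ===== SOURCE A (Python) =====
-- def find_most_frequent_keywords(scenes):
--     """Return the keyword that appears the most frequently across all scenes.
--     If there is a tie, return all the keywords with the highest frequency."""
--     my_dictionary = {}
--     result = []
--     for value in scenes.values():
--         for name in value:
--             if name in my_dictionary:
--                 my_dictionary[name] += 1
--             else:
--                 my_dictionary[name] = 1
--     max_val = float('-inf')
--     for val in my_dictionary.values():
--         if val > max_val:
--             max_val = val
--     for key, val in my_dictionary.items():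
--         if val == max_val:
--             result.append(key)
--
--     return result
-- ===== SOURCE B (Python) =====
-- def find_most_frequent_keywords(scenes):
--     """Inverted-index version: count keywords once, group keywords by their
--     count in first-appearance order, then return the group of the largest count."""
--     counts = {}
--     for keywords in scenes.values():
--         for kw in keywords:
--             counts[kw] = counts.get(kw, 0) + 1
--     groups = {}
--     for kw, c in counts.items():
--         groups.setdefault(c, []).append(kw)
--     return groups[max(groups)] if groups else []
-- ===== Notes on version B (the rewrite author's own statement) =====
-- stated objective: alternative
-- what changed: Replaces A's two extra passes over the counter (running-max scan over the values, then a match scan over the items) with an inverted index: keywords are grouped by their count into groups[count] in first-appearance order and the answer is read off at the largest key.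
import Mathlib
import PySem

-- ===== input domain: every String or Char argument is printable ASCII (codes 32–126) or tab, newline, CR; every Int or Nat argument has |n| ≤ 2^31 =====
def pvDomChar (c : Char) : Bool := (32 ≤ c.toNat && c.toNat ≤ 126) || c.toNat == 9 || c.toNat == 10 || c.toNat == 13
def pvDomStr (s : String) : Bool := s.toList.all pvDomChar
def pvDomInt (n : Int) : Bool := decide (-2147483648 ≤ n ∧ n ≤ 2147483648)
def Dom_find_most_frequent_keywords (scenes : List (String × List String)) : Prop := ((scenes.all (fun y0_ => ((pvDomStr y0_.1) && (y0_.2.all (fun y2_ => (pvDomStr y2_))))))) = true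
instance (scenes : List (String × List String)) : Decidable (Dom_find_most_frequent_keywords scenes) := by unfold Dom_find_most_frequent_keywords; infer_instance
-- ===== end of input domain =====

-- B replaces A's max-scan-then-match-scan over the counter with an inverted index
-- (count -> keywords in first-appearance order) read at its largest key; objective: alternative.


-- ===== PORT A =====
-- 'float('-inf')' is modelled as `none`: every int count compares greater than it,
-- and 'val == max_val' is 'some val = max_val' (exact, since counts are ints).
def find_most_frequent_keywords (scenes : List (String × List String)) : List String :=
  let my_dictionary : PySem.Dict String Int :=
    scenes.foldl (fun d p =>
      p.2.foldl (fun d name =>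
        if d.contains name then d.modify name 0 (fun v => v + 1)
        else d.insert name 1) d) PySem.Dict.empty
  let max_val : Option Int :=
    my_dictionary.values.foldl (fun m v =>
      if (match m with | none => true | some mv => decide (mv < v)) then some v else m) none
  my_dictionary.items.foldl (fun r p =>
    if some p.2 = max_val then r ++ [p.1] else r) []

-- ===== PORT B =====
-- 'groups.setdefault(c, []).append(kw)' is 'modify c [] (· ++ [kw])';
-- 'groups[max(groups)] if groups else []': max(groups) is the max of the keys, and a dict is
-- truthy iff its key list is nonempty (max? keys = none exactly then); groups[m] is getD m []
-- (m is always a present key, so no KeyError is reachable).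
def find_most_frequent_keywords_alt (scenes : List (String × List String)) : List String :=
  let counts : PySem.Dict String Int :=
    scenes.foldl (fun d p =>
      p.2.foldl (fun d kw => d.insert kw (d.getD kw 0 + 1)) d) PySem.Dict.empty
  let groups : PySem.Dict Int (List String) :=
    counts.items.foldl (fun g p => g.modify p.2 [] (fun l => l ++ [p.1])) PySem.Dict.empty
  match PySem.List.max? groups.keys (fun x => x) with
  | none => []
  | some m => groups.getD m []

-- ===== PRECONDITION & SPEC =====
def Spec_find_most_frequent_keywords (scenes : List (String × List String)) (out : List String) : Prop := out = find_most_frequent_keywords_alt scenes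
instance (scenes : List (String × List String)) (out : List String) : Decidable (Spec_find_most_frequent_keywords scenes out) := by unfold Spec_find_most_frequent_keywords; infer_instance

-- ===== CLAIM (what is proved, stated in full; the proofs are below) =====
def Claim_equal_find_most_frequent_keywords : Prop := ∀ (scenes : List (String × List String)), Dom_find_most_frequent_keywords scenes → Spec_find_most_frequent_keywords scenes (find_most_frequent_keywords scenes)

-- ===== LEMMAS AND PROOFS =====

-- A's counting step (membership test, then += 1 or = 1) equals B's 'counts[kw] = counts.get(kw, 0) + 1'.
theorem pv_step_eq (d : PySem.Dict String Int) (x : String) :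
    (if d.contains x then d.modify x 0 (fun v => v + 1) else d.insert x 1)
      = d.insert x (d.getD x 0 + 1) := by
  by_cases h : d.contains x = true
  · simp [h, PySem.Dict.modify]
  · have h' : d.contains x = false := by simpa using h
    rw [if_neg h, PySem.Dict.getD_of_not_contains d (0 : Int) h']
    norm_num

-- A's running-max loop over an Option Int accumulator is the plain foldl max after the first value.
theorem pv_optfold (vs : List Int) (a : Int) :
    vs.foldl (fun m v =>
      if (match m with | none => true | some mv => decide (mv < v)) then some v else m) (some a)
      = some (vs.foldl max a) := by
  induction vs generalizing a with
  | nil => rfl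
  | cons v t ih =>
      simp only [List.foldl_cons]
      rcases lt_or_ge a v with h | h
      · simp [h, ih, max_eq_right h.le]
      · simp [not_lt.mpr h, ih, max_eq_left h]

theorem find_most_frequent_keywords_eq_alt (scenes : List (String × List String)) :
    find_most_frequent_keywords scenes = find_most_frequent_keywords_alt scenes := by
  unfold find_most_frequent_keywords find_most_frequent_keywords_alt
  simp only [pv_step_eq]
  generalize (scenes.foldl (fun d p =>
      p.2.foldl (fun d kw => d.insert kw (d.getD kw 0 + 1)) d)
      (PySem.Dict.empty : PySem.Dict String Int)) = counts
  rw [show counts.values = counts.items.map (fun p => p.2) from rfl]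
  generalize counts.items = its
  -- B's groups, read back: its lookups and its key list
  have hgroups : ∀ m : Int,
      (its.foldl (fun g p => g.modify p.2 [] (fun l => l ++ [p.1]))
        (PySem.Dict.empty : PySem.Dict Int (List String))).getD m []
      = (its.filter (fun p => p.2 == m)).map (fun p => p.1) := by
    intro m
    rw [show (its.foldl (fun g p => g.modify p.2 [] (fun l => l ++ [p.1]))
          (PySem.Dict.empty : PySem.Dict Int (List String)))
        = ((its.map (fun p => (p.2, p.1))).foldl
            (fun g q => g.modify q.1 [] (fun l => l ++ [q.2])) PySem.Dict.empty) from
      (List.foldl_map (f := fun p : String × Int => (p.2, p.1))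
        (g := fun (g : PySem.Dict Int (List String)) (q : Int × String) =>
          g.modify q.1 [] (fun l => l ++ [q.2]))
        (l := its) (init := PySem.Dict.empty)).symm]
    rw [PySem.Dict.getD_foldl_modify_append]
    simp [List.filter_map, Function.comp_def]
  have hkeys :
      (its.foldl (fun g p => g.modify p.2 [] (fun l => l ++ [p.1]))
        (PySem.Dict.empty : PySem.Dict Int (List String))).keys
      = PySem.Set.ofList (its.map (fun p => p.2)) := by
    rw [PySem.Dict.keys_foldl_modify_key its (fun p => p.2) []
        (fun _ p => (fun l => l ++ [p.1]))]
    rw [PySem.Dict.keys_empty, PySem.Set.update_nil_left]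
  rw [hkeys]
  rcases hmax : PySem.List.max? (PySem.Set.ofList (its.map (fun p => p.2)))
      (fun x => x) with _ | m
  · -- empty dict: both sides are []
    simp only [hmax]
    rw [PySem.List.max?_eq_none_iff] at hmax
    have hits : its = [] := by
      cases its with
      | nil => rfl
      | cons q t =>
        exfalso
        have hq : q.2 ∈ PySem.Set.ofList ((q :: t).map (fun p => p.2)) :=
          (PySem.Set.mem_ofList _ _).mpr (by simp)
        rw [hmax] at hq
        simp at hq
    subst hits
    rfl
  · simp only [hmax]
    rw [hgroups m]
    have hmem : m ∈ its.map (fun p => p.2) :=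
      (PySem.Set.mem_ofList _ _).mp (PySem.List.max?_mem hmax)
    cases its with
    | nil => simp at hmem
    | cons q t =>
      set M := (t.map (fun p => p.2)).foldl max q.2 with hMdef
      have hA : ((q :: t).map (fun p => p.2)).foldl (fun m v =>
          if (match m with | none => true | some mv => decide (mv < v)) = true
          then some v else m) none = some M := by
        simp only [List.map_cons, List.foldl_cons, if_true]
        exact pv_optfold _ _
      rw [hA]
      have hMmax := PySem.List.le_foldl_max (t.map (fun p => p.2)) q.2
      have hMmem := PySem.List.foldl_max_mem (t.map (fun p => p.2)) q.2
      have hmeq : m = M := by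
        apply le_antisymm
        · rw [List.map_cons] at hmem
          rcases List.mem_cons.mp hmem with h | h
          · exact h ▸ hMmax.1
          · exact hMmax.2 m h
        · have hMk : M ∈ PySem.Set.ofList ((q :: t).map (fun p => p.2)) := by
            rw [PySem.Set.mem_ofList, List.map_cons, List.mem_cons]
            rcases hMmem with h | h
            · exact Or.inl h
            · exact Or.inr h
          exact PySem.List.max?_isMax hmax M hMk
      have hfun : (fun (r : List String) (p : String × Int) =>
            if some p.2 = some M then r ++ [p.1] else r)
          = (fun r p => if (p.2 == M) = true then r ++ [p.1] else r) := by
        funext r p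
        by_cases h : p.2 = M <;> simp [h]
      rw [hfun, PySem.List.foldl_append_if (fun p => p.2 == M) (fun p => p.1) (q :: t) []]
      simp [hmeq]

-- ===== VERDICT (by name: the statement is the Claim_ definition above) =====
theorem find_most_frequent_keywords_spec : Claim_equal_find_most_frequent_keywords := by
  intro scenes _
  unfold Spec_find_most_frequent_keywords
  exact find_most_frequent_keywords_eq_alt scenes
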